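-- pv_equiv track=rewrite | github.com/SunAndSteel/starl | obstruction_analysis.py | _remove_sparse_pixels
-- ===== SOURCE A (Python) =====
-- from typing import Any, Iterable, List, Mapping, Optional, Sequence, Tuple
--
-- GridInt = List[List[int]]
--
-- def _occupied_neighbors(mask: Sequence[Sequence[int]], x: int, y: int) -> int:
--     height = len(mask)
--     width = len(mask[0]) if height else 0
--     total = 0
--     for ny in range(max(0, y - 1), min(height, y + 2)):
--         for nx in range(max(0, x - 1), min(width, x + 2)):
--             if nx == x and ny == y:
--                 continue
--             total += 1 if mask[ny][nx] else 0
--     return total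
--
-- def _remove_sparse_pixels(mask: Sequence[Sequence[int]], min_neighbors: int = 2) -> GridInt:
--     height = len(mask)
--     width = len(mask[0]) if height else 0
--     filtered = [[0] * width for _ in range(height)]
--     for y in range(height):
--         for x in range(width):
--             if mask[y][x] and _occupied_neighbors(mask, x, y) >= min_neighbors:
--                 filtered[y][x] = 1
--     return filtered
-- ===== SOURCE B (Python) =====
-- def _remove_sparse_pixels(mask, min_neighbors=2):
--     # Separable box filter: booleanize once, horizontal triple-sums per row,
--     # then vertical sums of those; neighbor count = box sum minus the center.
--     height = len(mask)
--     width = len(mask[0]) if height else 0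
--     b = [[1 if mask[y][x] else 0 for x in range(width)] for y in range(height)]
--     h = [[sum(row[nx] for nx in range(max(0, x - 1), min(width, x + 2)))
--           for x in range(width)] for row in b]
--     return [[1 if b[y][x] and
--              sum(h[ny][x] for ny in range(max(0, y - 1), min(height, y + 2))) - b[y][x] >= min_neighbors
--              else 0
--              for x in range(width)]
--             for y in range(height)]
-- ===== Notes on version B (the rewrite author's own statement) =====
-- stated objective: alternative
-- what changed: Replaces the per-pixel 3x3 neighborhood rescan with a separable two-pass box filter: booleanize once, precompute horizontal triple-sums per row, then the neighbor count of each pixel is a vertical sum of three precomputed row sums minus the center.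
import Mathlib
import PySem

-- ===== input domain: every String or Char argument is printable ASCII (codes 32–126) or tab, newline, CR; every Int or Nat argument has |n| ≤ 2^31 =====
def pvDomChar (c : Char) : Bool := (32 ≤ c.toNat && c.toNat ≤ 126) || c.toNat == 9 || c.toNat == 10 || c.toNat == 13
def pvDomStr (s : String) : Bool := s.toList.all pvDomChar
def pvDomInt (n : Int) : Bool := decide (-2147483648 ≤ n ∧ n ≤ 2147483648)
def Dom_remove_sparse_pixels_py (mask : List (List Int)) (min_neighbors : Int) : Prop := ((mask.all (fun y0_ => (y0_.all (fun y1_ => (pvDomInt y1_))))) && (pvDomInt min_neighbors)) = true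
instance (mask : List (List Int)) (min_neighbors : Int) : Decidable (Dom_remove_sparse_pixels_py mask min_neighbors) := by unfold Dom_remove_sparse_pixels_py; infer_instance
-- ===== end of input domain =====

-- B replaces A's per-pixel 3x3 rescan by a separable two-pass box filter (alternative decomposition, same asymptotics).

-- ===== PORT A =====
-- mask[y][x] (indices always in range under Pre_): pyGetD with default
def pvCell (mask : List (List Int)) (y x : Int) : Int :=
  PySem.List.pyGetD (PySem.List.pyGetD mask y []) x 0

def occupied_neighbors_py (mask : List (List Int)) (x y : Int) : Int :=
  let height : Int := mask.length
  let width : Int := if height ≠ 0 then ((PySem.List.pyGetD mask 0 []).length : Int) else 0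
  (PySem.List.pyRange (max 0 (y-1)) (min height (y+2)) 1).foldl (fun total ny =>
    (PySem.List.pyRange (max 0 (x-1)) (min width (x+2)) 1).foldl (fun total nx =>
      if nx = x ∧ ny = y then total
      else total + (if pvCell mask ny nx ≠ 0 then 1 else 0)) total) 0

def remove_sparse_pixels_py (mask : List (List Int)) (min_neighbors : Int) : List (List Int) :=
  let height : Int := mask.length
  let width : Int := if height ≠ 0 then ((PySem.List.pyGetD mask 0 []).length : Int) else 0
  (PySem.List.pyRange 0 height 1).map (fun y =>
    (PySem.List.pyRange 0 width 1).map (fun x =>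
      if pvCell mask y x ≠ 0 ∧ min_neighbors ≤ occupied_neighbors_py mask x y then 1 else 0))

-- ===== PORT B =====
def remove_sparse_pixels_py_alt (mask : List (List Int)) (min_neighbors : Int) : List (List Int) :=
  let height : Int := mask.length
  let width : Int := if height ≠ 0 then ((PySem.List.pyGetD mask 0 []).length : Int) else 0
  let b : List (List Int) := (PySem.List.pyRange 0 height 1).map (fun y =>
    (PySem.List.pyRange 0 width 1).map (fun x => if pvCell mask y x ≠ 0 then (1:Int) else 0))
  let h : List (List Int) := b.map (fun row =>
    (PySem.List.pyRange 0 width 1).map (fun x =>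
      ((PySem.List.pyRange (max 0 (x-1)) (min width (x+2)) 1).map
        (fun nx => PySem.List.pyGetD row nx 0)).sum))
  (PySem.List.pyRange 0 height 1).map (fun y =>
    (PySem.List.pyRange 0 width 1).map (fun x =>
      if PySem.List.pyGetD (PySem.List.pyGetD b y []) x 0 ≠ 0 ∧ min_neighbors ≤
          ((PySem.List.pyRange (max 0 (y-1)) (min height (y+2)) 1).map
            (fun ny => PySem.List.pyGetD (PySem.List.pyGetD h ny []) x 0)).sum
          - PySem.List.pyGetD (PySem.List.pyGetD b y []) x 0
       then 1 else 0))

-- ===== PRECONDITION & SPEC =====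
-- Pre_ excludes exactly the ragged masks with a row shorter than row 0: there Python A
-- (and Python B) raise IndexError on mask[y][x].
def Pre_remove_sparse_pixels_py (mask : List (List Int)) (min_neighbors : Int) : Prop :=
  ∀ row ∈ mask, (mask.headD []).length ≤ row.length
instance (mask : List (List Int)) (min_neighbors : Int) : Decidable (Pre_remove_sparse_pixels_py mask min_neighbors) := by unfold Pre_remove_sparse_pixels_py; infer_instance
def pvWitness_remove_sparse_pixels_py : List (List Int) × Int := ([[1,1],[1,1]], 2)

def Spec_remove_sparse_pixels_py (mask : List (List Int)) (min_neighbors : Int) (out : List (List Int)) : Prop := out = remove_sparse_pixels_py_alt mask min_neighbors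
instance (mask : List (List Int)) (min_neighbors : Int) (out : List (List Int)) : Decidable (Spec_remove_sparse_pixels_py mask min_neighbors out) := by unfold Spec_remove_sparse_pixels_py; infer_instance

-- ===== CLAIM (what is proved, stated in full; the proofs are below) =====
def Claim_equal_remove_sparse_pixels_py : Prop := ∀ (mask : List (List Int)) (min_neighbors : Int), Dom_remove_sparse_pixels_py mask min_neighbors → Pre_remove_sparse_pixels_py mask min_neighbors → Spec_remove_sparse_pixels_py mask min_neighbors (remove_sparse_pixels_py mask min_neighbors)

-- ===== LEMMAS AND PROOFS =====

theorem pv_sum_ite_zero {l : List Int} {x : Int} (f : Int → Int)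
    (hnd : l.Nodup) (hx : x ∈ l) :
    (l.map (fun e => if e = x then 0 else f e)).sum = (l.map f).sum - f x := by
  induction l with
  | nil => cases hx
  | cons a t ih =>
    rcases List.nodup_cons.mp hnd with ⟨ha, hnd'⟩
    rcases List.mem_cons.mp hx with h | h
    · subst h
      have hC : ∀ e ∈ t, (if e = x then (0:Int) else f e) = f e := by
        intro e he
        have hne : e ≠ x := fun heq => ha (heq ▸ he)
        simp [hne]
      simp [List.map_congr_left hC]
    · have hax : a ≠ x := fun heq => ha (heq ▸ h)
      simp [hax, ih hnd' h]
      ring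

theorem pv_sum_ite_single {l : List Int} {y : Int} (c : Int)
    (hnd : l.Nodup) (hy : y ∈ l) :
    (l.map (fun e => if e = y then c else 0)).sum = c := by
  induction l with
  | nil => cases hy
  | cons a t ih =>
    rcases List.nodup_cons.mp hnd with ⟨ha, hnd'⟩
    rcases List.mem_cons.mp hy with h | h
    · subst h
      have hC : ∀ e ∈ t, (if e = y then c else 0) = (0:Int) := by
        intro e he
        have hne : e ≠ y := fun heq => ha (heq ▸ he)
        simp [hne]
      simp [List.map_congr_left hC]
    · have hay : a ≠ y := fun heq => ha (heq ▸ h)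
      simp [hay, ih hnd' h]

theorem pv_sum_map_sub (l : List Int) (p q : Int → Int) :
    (l.map (fun e => p e - q e)).sum = (l.map p).sum - (l.map q).sum := by
  induction l with
  | nil => simp
  | cons a t ih => simp [ih]; ring

-- neighbor count of A as a double sum minus the center
theorem pv_occ_eq (mask : List (List Int)) (x y : Int)
    (hy0 : 0 ≤ y) (hyH : y < (mask.length : Int))
    (hx0 : 0 ≤ x) (hxW : x < ((PySem.List.pyGetD mask 0 []).length : Int)) :
    occupied_neighbors_py mask x y =
      ((PySem.List.pyRange (max 0 (y-1)) (min (mask.length : Int) (y+2)) 1).map (fun ny =>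
        ((PySem.List.pyRange (max 0 (x-1)) (min ((PySem.List.pyGetD mask 0 []).length : Int) (x+2)) 1).map
          (fun nx => if pvCell mask ny nx ≠ 0 then (1:Int) else 0)).sum)).sum
      - (if pvCell mask y x ≠ 0 then (1:Int) else 0) := by
  have hH : (mask.length : Int) ≠ 0 := by omega
  simp only [occupied_neighbors_py, if_pos hH]
  set W : Int := ((PySem.List.pyGetD mask 0 []).length : Int) with hWdef
  set Rx := PySem.List.pyRange (max 0 (x-1)) (min W (x+2)) 1 with hRx
  set Ry := PySem.List.pyRange (max 0 (y-1)) (min (mask.length : Int) (y+2)) 1 with hRy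
  have hxmem : x ∈ Rx := by
    rw [hRx, PySem.List.mem_pyRange_one]; omega
  have hymem : y ∈ Ry := by
    rw [hRy, PySem.List.mem_pyRange_one]; omega
  have houter : (fun (total ny : Int) =>
      Rx.foldl (fun total nx =>
        if nx = x ∧ ny = y then total
        else total + (if pvCell mask ny nx ≠ 0 then 1 else 0)) total)
    = (fun total ny => total + (Rx.map (fun nx => if nx = x ∧ ny = y then 0
        else if pvCell mask ny nx ≠ 0 then (1:Int) else 0)).sum) := by
    funext t ny
    have hf : (fun (total nx : Int) =>
        if nx = x ∧ ny = y then total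
        else total + (if pvCell mask ny nx ≠ 0 then 1 else 0))
      = (fun total nx => total + (if nx = x ∧ ny = y then 0
          else if pvCell mask ny nx ≠ 0 then (1:Int) else 0)) := by
      funext t' nx
      by_cases h : nx = x ∧ ny = y <;> simp [h]
    rw [hf, PySem.List.foldl_add]
  rw [houter, PySem.List.foldl_add]
  have hcong : ∀ ny ∈ Ry,
      (Rx.map (fun nx => if nx = x ∧ ny = y then 0
        else if pvCell mask ny nx ≠ 0 then (1:Int) else 0)).sum
      = (Rx.map (fun nx => if pvCell mask ny nx ≠ 0 then (1:Int) else 0)).sum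
        - (if ny = y then (if pvCell mask y x ≠ 0 then (1:Int) else 0) else 0) := by
    intro ny _
    by_cases hne : ny = y
    · subst hne
      have hg : (fun nx => if nx = x ∧ ny = ny then 0
          else if pvCell mask ny nx ≠ 0 then (1:Int) else 0)
        = (fun nx => if nx = x then 0
          else if pvCell mask ny nx ≠ 0 then (1:Int) else 0) := by
        funext nx; by_cases h : nx = x <;> simp [h]
      rw [hg, pv_sum_ite_zero (fun nx => if pvCell mask ny nx ≠ 0 then (1:Int) else 0)
            (by rw [hRx]; exact PySem.List.nodup_pyRange_one _ _) hxmem]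
      simp
    · have hg : (fun nx => if nx = x ∧ ny = y then 0
          else if pvCell mask ny nx ≠ 0 then (1:Int) else 0)
        = (fun nx => if pvCell mask ny nx ≠ 0 then (1:Int) else 0) := by
        funext nx; simp [hne]
      rw [hg]; simp [hne]
  rw [List.map_congr_left hcong, pv_sum_map_sub,
      pv_sum_ite_single (if pvCell mask y x ≠ 0 then (1:Int) else 0)
        (by rw [hRy]; exact PySem.List.nodup_pyRange_one _ _) hymem]
  ring

-- ===== VERDICT (by name: the statement is the Claim_ definition above) =====
theorem remove_sparse_pixels_py_spec : Claim_equal_remove_sparse_pixels_py := by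
  intro mask mn _ _
  unfold Spec_remove_sparse_pixels_py
  simp only [remove_sparse_pixels_py, remove_sparse_pixels_py_alt]
  apply List.map_congr_left
  intro y hy
  rw [PySem.List.mem_pyRange_one] at hy
  have hH : (mask.length : Int) ≠ 0 := by omega
  simp only [if_pos hH]
  apply List.map_congr_left
  intro x hx
  rw [PySem.List.mem_pyRange_one] at hx
  set W : Int := ((PySem.List.pyGetD mask 0 []).length : Int) with hWdef
  have hb : ∀ (j i : Int), 0 ≤ j → j < (mask.length : Int) → 0 ≤ i → i < W →
      PySem.List.pyGetD (PySem.List.pyGetD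
        ((PySem.List.pyRange 0 (mask.length : Int) 1).map (fun y' =>
          (PySem.List.pyRange 0 W 1).map (fun x' => if pvCell mask y' x' ≠ 0 then (1:Int) else 0))) j []) i 0
      = (if pvCell mask j i ≠ 0 then (1:Int) else 0) := by
    intro j i hj0 hj hi0 hi
    rw [PySem.List.pyGetD_map_pyRange_of_nonneg _ _ _ _ hj0 hj,
        PySem.List.pyGetD_map_pyRange_of_nonneg _ _ _ _ hi0 hi]
  rw [hb y x hy.1 hy.2 hx.1 hx.2]
  rw [List.map_map]
  have hv : ((PySem.List.pyRange (max 0 (y-1)) (min (mask.length : Int) (y+2)) 1).map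
      (fun ny => PySem.List.pyGetD (PySem.List.pyGetD
        ((PySem.List.pyRange 0 (mask.length : Int) 1).map
          ((fun row => (PySem.List.pyRange 0 W 1).map (fun x' =>
              ((PySem.List.pyRange (max 0 (x'-1)) (min W (x'+2)) 1).map
                (fun nx => PySem.List.pyGetD row nx 0)).sum)) ∘
           (fun y' => (PySem.List.pyRange 0 W 1).map
              (fun x' => if pvCell mask y' x' ≠ 0 then (1:Int) else 0)))) ny []) x 0)).sum
    = ((PySem.List.pyRange (max 0 (y-1)) (min (mask.length : Int) (y+2)) 1).map (fun ny =>
        ((PySem.List.pyRange (max 0 (x-1)) (min W (x+2)) 1).map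
          (fun nx => if pvCell mask ny nx ≠ 0 then (1:Int) else 0)).sum)).sum := by
    apply congrArg
    apply List.map_congr_left
    intro ny hny
    rw [PySem.List.mem_pyRange_one] at hny
    have hny0 : 0 ≤ ny := by omega
    have hnyH : ny < (mask.length : Int) := by omega
    rw [PySem.List.pyGetD_map_pyRange_of_nonneg _ _ _ _ hny0 hnyH]
    simp only [Function.comp]
    rw [PySem.List.pyGetD_map_pyRange_of_nonneg _ _ _ _ hx.1 hx.2]
    apply congrArg
    apply List.map_congr_left
    intro nx hnx
    rw [PySem.List.mem_pyRange_one] at hnx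
    have hnx0 : 0 ≤ nx := by omega
    have hnxW : nx < W := by omega
    rw [PySem.List.pyGetD_map_pyRange_of_nonneg _ _ _ _ hnx0 hnxW]
  rw [hv, pv_occ_eq mask x y hy.1 hy.2 hx.1 hx.2]
  simp only [← hWdef]
  by_cases hC : pvCell mask y x ≠ 0 <;> simp [hC]
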